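-- pv_equiv track=rewrite | github.com/Insiro/algorithm-study | Programmers/siso.py | gen_sets
-- ===== SOURCE A (Python) =====
-- def check_c(c):
--     return "a" <= c and c <= "z"
--
-- def gen_sets(str):
--     sets = []
--     f = True
--     for idx in range(len(str) - 1):
--         if f:
--             if not check_c(str[idx]):
--                 continue
--             f = False
--         if not check_c(str[idx + 1]):
--             idx += 1
--             f = True
--             continue
--         sets.append(f"{str[idx]}{str[idx+1]}")
--     return sorted(sets)
-- ===== SOURCE B (Python) =====
-- def gen_sets(str):
--     # Partition the string into maximal runs of lowercase letters,
--     # then emit each run's adjacent pairs and sort.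
--     runs = []
--     cur = ""
--     for c in str:
--         if "a" <= c <= "z":
--             cur += c
--         else:
--             if cur:
--                 runs.append(cur)
--             cur = ""
--     if cur:
--         runs.append(cur)
--     return sorted(x + y for r in runs for x, y in zip(r, r[1:]))
-- ===== Notes on version B (the rewrite author's own statement) =====
-- stated objective: alternative
-- what changed: Replaces A's single index scan with a continuation flag by a two-stage decomposition: first partition the string into maximal lowercase runs, then emit each run's adjacent pairs via zip and sort.
import Mathlib
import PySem

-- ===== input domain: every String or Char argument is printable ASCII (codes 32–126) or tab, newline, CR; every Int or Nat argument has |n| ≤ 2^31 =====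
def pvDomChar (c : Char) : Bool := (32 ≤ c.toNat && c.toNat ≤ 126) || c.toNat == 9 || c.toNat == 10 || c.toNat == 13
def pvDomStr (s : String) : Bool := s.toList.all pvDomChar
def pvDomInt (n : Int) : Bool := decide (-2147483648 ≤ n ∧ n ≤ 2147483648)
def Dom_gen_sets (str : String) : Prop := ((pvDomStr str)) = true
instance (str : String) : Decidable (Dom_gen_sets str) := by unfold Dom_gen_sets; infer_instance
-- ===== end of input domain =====

-- B partitions the string into maximal lowercase runs and emits each run's adjacent
-- pairs, instead of A's flat index scan with a continuation flag (alternative decomposition).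

-- ===== PORT A =====
-- check_c compares one-character strings; on single characters Python's string
-- comparison "a" <= c <= "z" is exactly the character-code comparison used here.
def check_c (c : Char) : Bool := ('a' ≤ c) && (c ≤ 'z')

-- The loop 'for idx in range(len(str)-1)' reading str[idx], str[idx+1] becomes the
-- obvious structural recursion on the character list: at each step the head pair is
-- (str[idx], str[idx+1]); state (sets, f) is A's state; branch order preserved
-- ('continue' = recursing with the updated state; the 'idx += 1' is a no-op in Python).
def genLoop : List Char → List String → Bool → List String
  | [], sets, _ => sets
  | [_], sets, _ => sets
  | a :: b :: rest, sets, f =>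
    if f then
      if !check_c a then genLoop (b :: rest) sets f
      else  -- f = False, fall through to the second test
        if !check_c b then genLoop (b :: rest) sets true
        else genLoop (b :: rest) (sets ++ [String.mk [a, b]]) false
    else
      if !check_c b then genLoop (b :: rest) sets true
      else genLoop (b :: rest) (sets ++ [String.mk [a, b]]) false

def gen_sets (str : String) : List String :=
  PySem.List.sorted (genLoop str.toList [] true) (fun x => x) false

-- ===== PORT B =====
def isLow (c : Char) : Bool := ('a' ≤ c) && (c ≤ 'z')

-- state = (runs, cur), exactly Source B's loop
def runStep (st : List (List Char) × List Char) (c : Char) : List (List Char) × List Char :=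
  if isLow c then (st.1, st.2 ++ [c])
  else ((if st.2.isEmpty then st.1 else st.1 ++ [st.2]), [])

def lcRuns (cs : List Char) : List (List Char) :=
  let st := cs.foldl runStep ([], [])
  if st.2.isEmpty then st.1 else st.1 ++ [st.2]

-- pairs of a run: x+y for x,y in zip(r, r[1:]); r[1:] is r.drop 1 (exact: start index 1 ≥ 0)
def pairsOf (r : List Char) : List String :=
  (r.zip (r.drop 1)).map (fun p => String.mk [p.1, p.2])

def gen_sets_alt (str : String) : List String :=
  PySem.List.sorted ((lcRuns str.toList).flatMap pairsOf) (fun x => x) false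

-- ===== PRECONDITION & SPEC =====
def Spec_gen_sets (str : String) (out : List String) : Prop := out = gen_sets_alt str
instance (str : String) (out : List String) : Decidable (Spec_gen_sets str out) := by unfold Spec_gen_sets; infer_instance

-- ===== CLAIM (what is proved, stated in full; the proofs are below) =====
def Claim_equal_gen_sets : Prop := ∀ (str : String), Dom_gen_sets str → Spec_gen_sets str (gen_sets str)

-- ===== LEMMAS AND PROOFS =====

-- canonical description: the adjacent pairs of the string whose two characters are both lowercase
def pairs : List Char → List String
  | [] => []
  | [_] => []
  | a :: b :: r => (if check_c a && check_c b then [String.mk [a, b]] else []) ++ pairs (b :: r)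

-- pairs continuing after a char l already known (l's lowercase-ness is irrelevant to the shape)
def pairsFrom : Char → List Char → List String
  | _, [] => []
  | l, c :: rest => if check_c c then String.mk [l, c] :: pairsFrom c rest else pairs rest

theorem pairs_cons (c : Char) (rest : List Char) :
    pairs (c :: rest) = if check_c c then pairsFrom c rest else pairs rest := by
  induction rest generalizing c with
  | nil => simp [pairs, pairsFrom]
  | cons d r ih =>
    by_cases hc : check_c c = true <;> by_cases hd : check_c d = true <;>
      simp [pairs, pairsFrom, hc, hd, ih d]

theorem genLoop_eq (cs : List Char) : ∀ (sets : List String) (f : Bool),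
    (f = false → ∀ a t, cs = a :: t → check_c a = true) →
    genLoop cs sets f = sets ++ pairs cs := by
  induction cs with
  | nil => intro sets f _; simp [genLoop, pairs]
  | cons a tail ih =>
    intro sets f hf
    cases tail with
    | nil => simp [genLoop, pairs]
    | cons b r =>
      have step2 : (!check_c b) = true ∨ check_c b = true := by
        cases check_c b <;> simp
      by_cases hb : check_c b = true
      · -- pair may be appended; recursion with f = false, head b lowercase
        have ihb := ih (sets ++ [String.mk [a, b]]) false (by intro _ x t hx; cases hx; exact hb)
        by_cases hf' : f = true
        · subst hf'
          by_cases ha : check_c a = true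
          · simp [genLoop, ha, hb, pairs, ihb]
          · have iht := ih sets true (by simp)
            simp [genLoop, ha, hb, pairs, iht]
        · have hf0 : f = false := by cases f <;> simp_all
          subst hf0
          have ha := hf rfl a (b :: r) rfl
          simp [genLoop, ha, hb, pairs, ihb]
      · -- no pair; recursion with f = true
        have hb' : check_c b = false := by simpa using hb
        have iht := ih sets true (by simp)
        by_cases hf' : f = true
        · subst hf'
          by_cases ha : check_c a = true
          · simp [genLoop, ha, hb', pairs, iht]
          · simp [genLoop, show check_c a = false from by simpa using ha, hb', pairs, iht]
        · have hf0 : f = false := by cases f <;> simp_all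
          subst hf0
          have ha := hf rfl a (b :: r) rfl
          simp [genLoop, ha, hb', pairs, iht]

theorem isLow_eq_check (c : Char) : isLow c = check_c c := rfl

theorem pairsOf_cons_cons (a b : Char) (r : List Char) :
    pairsOf (a :: b :: r) = String.mk [a, b] :: pairsOf (b :: r) := by
  simp [pairsOf, List.zip]

theorem pairsOf_append_singleton (cur : List Char) (c : Char) (h : cur ≠ []) :
    pairsOf (cur ++ [c]) = pairsOf cur ++ [String.mk [cur.getLastD ' ', c]] := by
  induction cur with
  | nil => simp at h
  | cons a t ih =>
    cases t with
    | nil => simp [pairsOf, List.zip]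
    | cons b r =>
      have := ih (by simp)
      simp only [List.cons_append] at *
      rw [pairsOf_cons_cons, pairsOf_cons_cons, this]
      simp [List.getLastD]

theorem runs_inv (cs : List Char) : ∀ (runs : List (List Char)) (cur : List Char),
    (let st := cs.foldl runStep (runs, cur);
     (if st.2.isEmpty then st.1 else st.1 ++ [st.2]).flatMap pairsOf)
    = runs.flatMap pairsOf ++ pairsOf cur ++
      (if cur.isEmpty then pairs cs else pairsFrom (cur.getLastD ' ') cs) := by
  induction cs with
  | nil =>
    intro runs cur
    cases cur with
    | nil => simp [pairs, pairsOf]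
    | cons x t => simp [pairsFrom, pairsOf]
  | cons c rest ih =>
    intro runs cur
    by_cases hc : check_c c = true
    · -- lowercase: cur grows
      have hstep : runStep (runs, cur) c = (runs, cur ++ [c]) := by
        simp [runStep, isLow_eq_check, hc]
      have ihx := ih runs (cur ++ [c])
      simp only [List.foldl_cons, hstep] at *
      rw [ihx]
      cases cur with
      | nil =>
        simp [pairsOf, pairs_cons, hc]
      | cons x t =>
        rw [pairsOf_append_singleton (x :: t) c (by simp)]
        simp [pairsFrom, hc, List.getLastD]
    · -- not lowercase: cur flushed
      have hc' : check_c c = false := by simpa using hc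
      cases cur with
      | nil =>
        have hstep : runStep (runs, ([] : List Char)) c = (runs, []) := by
          simp [runStep, isLow_eq_check, hc']
        have ihx := ih runs []
        simp only [List.foldl_cons, hstep] at *
        rw [ihx]
        simp [pairs_cons, hc']
      | cons x t =>
        have hstep : runStep (runs, x :: t) c = (runs ++ [x :: t], []) := by
          simp [runStep, isLow_eq_check, hc']
        have ihx := ih (runs ++ [x :: t]) []
        simp only [List.foldl_cons, hstep] at *
        rw [ihx]
        simp [pairsFrom, pairsOf, hc']

theorem lists_eq (cs : List Char) :
    genLoop cs [] true = (lcRuns cs).flatMap pairsOf := by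
  rw [genLoop_eq cs [] true (by simp)]
  have := runs_inv cs [] []
  simp only [lcRuns] at *
  simpa using this.symm

-- ===== VERDICT (by name: the statement is the Claim_ definition above) =====
theorem gen_sets_spec : Claim_equal_gen_sets := by
  intro str _
  unfold Spec_gen_sets gen_sets gen_sets_alt
  rw [lists_eq]
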